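-- pv_equiv track=rewrite | github.com/unblemishedgelexy/unblemished-ai | app/services/brain/response_post_processor.py | _strip_inline_system_meta
-- ===== SOURCE A (Python) =====
-- def _strip_inline_system_meta(line: str) -> str:
--     lowered = line.lower()
--     first_index: int | None = None
--     for marker in _SYSTEM_META_INLINE_MARKERS:
--         index = lowered.find(marker)
--         if index == -1:
--             continue
--         if first_index is None or index < first_index:
--             first_index = index
--     if first_index is None:
--         return line.strip()
--     if first_index == 0:
--         return ""
--     return line[:first_index].rstrip(" -:|;,.\t")
--
-- _SYSTEM_META_INLINE_MARKERS: tuple[str, ...] = (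
--     "prompt basis:",
--     "promptversion:",
--     "traceid:",
--     "reasoningmode:",
--     "intent:",
--     "answerstyle:",
--     "requestedmode:",
--     "personanamehint:",
--     "userinput:",
--     "contextkeys:",
--     "userprofile:",
--     "relevant past context:",
--     "maxtokens:",
--     "temperature:",
--     "styleinstruction:",
--     "strictresponsemode:",
-- )
-- ===== SOURCE B (Python) =====
-- _SYSTEM_META_INLINE_MARKERS: tuple[str, ...] = (
--     "prompt basis:",
--     "promptversion:",
--     "traceid:",
--     "reasoningmode:",
--     "intent:",
--     "answerstyle:",
--     "requestedmode:",
--     "personanamehint:",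
--     "userinput:",
--     "contextkeys:",
--     "userprofile:",
--     "relevant past context:",
--     "maxtokens:",
--     "temperature:",
--     "styleinstruction:",
--     "strictresponsemode:",
-- )
--
--
-- def _strip_inline_system_meta(line: str) -> str:
--     lowered = line.lower()
--     idx = next((i for i in range(len(lowered))
--                 if lowered.startswith(_SYSTEM_META_INLINE_MARKERS, i)), None)
--     if idx is None:
--         return line.strip()
--     if idx == 0:
--         return ""
--     return line[:idx].rstrip(" -:|;,.\t")
-- ===== Notes on version B (the rewrite author's own statement) =====
-- stated objective: idiomatic
-- what changed: A runs a separate full .find() for each of the 16 markers and keeps the minimum index; B makes one left-to-right scan of the lowered line, stopping at the first position where str.startswith with the marker tuple matches.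
import Mathlib
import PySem

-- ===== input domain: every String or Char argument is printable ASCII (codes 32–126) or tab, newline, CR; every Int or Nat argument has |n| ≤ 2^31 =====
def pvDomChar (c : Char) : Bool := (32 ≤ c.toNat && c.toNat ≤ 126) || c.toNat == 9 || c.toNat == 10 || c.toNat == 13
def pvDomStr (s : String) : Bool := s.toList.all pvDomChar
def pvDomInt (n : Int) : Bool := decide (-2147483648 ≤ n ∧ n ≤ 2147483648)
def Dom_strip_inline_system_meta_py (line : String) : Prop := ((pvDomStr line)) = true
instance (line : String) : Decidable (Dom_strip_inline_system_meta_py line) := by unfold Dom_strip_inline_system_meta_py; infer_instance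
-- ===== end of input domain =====

-- B replaces A's 16 separate `find`-then-minimum passes by one left-to-right scan that
-- stops at the first position where any marker starts (objective: idiomatic/alternative).

-- ===== PORT A =====
def pvMarkers : List (List Char) :=
  ["prompt basis:".toList, "promptversion:".toList, "traceid:".toList,
   "reasoningmode:".toList, "intent:".toList, "answerstyle:".toList,
   "requestedmode:".toList, "personanamehint:".toList, "userinput:".toList,
   "contextkeys:".toList, "userprofile:".toList, "relevant past context:".toList,
   "maxtokens:".toList, "temperature:".toList, "styleinstruction:".toList,
   "strictresponsemode:".toList]

def pvStripSet : List Char := " -:|;,.\t".toList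

-- Python rstrip(chars) ported by hand (exact: drop trailing chars in the set)
def pvRstrip (cs : List Char) (chars : List Char) : List Char :=
  (cs.reverse.dropWhile (fun c => chars.contains c)).reverse

-- the body of A's `for marker in _SYSTEM_META_INLINE_MARKERS` loop
def pvStepA (lo : List Char) (acc : Option Int) (marker : List Char) : Option Int :=
  let index := PySem.Chars.find lo marker
  if index = -1 then acc
  else match acc with
    | none => some index
    | some f => if index < f then some index else some f

def strip_inline_system_meta_py (line : String) : String :=
  let lo := (PySem.Str.lower line).toList
  let first_index : Option Int := pvMarkers.foldl (pvStepA lo) none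
  match first_index with
  | none => PySem.Str.strip line
  | some fi =>
    if fi = 0 then ""
    else String.ofList (pvRstrip (PySem.Chars.slice line.toList none (some fi)) pvStripSet)

-- ===== PORT B =====
-- `next((i for i in range(len(lowered)) if lowered.startswith(_MARKERS, i)), None)`:
-- scan positions left to right, stop at the first where some marker starts
def pvScan : List Char → Nat → Option Nat
  | [], _ => none
  | c :: rest, i =>
    if pvMarkers.any (fun m => m.isPrefixOf (c :: rest)) then some i
    else pvScan rest (i + 1)

def strip_inline_system_meta_py_alt (line : String) : String :=
  let lo := (PySem.Str.lower line).toList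
  match pvScan lo 0 with
  | none => PySem.Str.strip line
  | some i =>
    if i = 0 then ""
    else String.ofList (pvRstrip (line.toList.take i) pvStripSet)

-- ===== PRECONDITION & SPEC =====
def Spec_strip_inline_system_meta_py (line : String) (out : String) : Prop := out = strip_inline_system_meta_py_alt line
instance (line : String) (out : String) : Decidable (Spec_strip_inline_system_meta_py line out) := by unfold Spec_strip_inline_system_meta_py; infer_instance

-- ===== CLAIM (what is proved, stated in full; the proofs are below) =====
def Claim_equal_strip_inline_system_meta_py : Prop := ∀ (line : String), Dom_strip_inline_system_meta_py line → Spec_strip_inline_system_meta_py line (strip_inline_system_meta_py line)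

-- ===== LEMMAS AND PROOFS =====

-- "some marker starts at position j of lo"
def pvHit (lo : List Char) (j : Nat) : Prop := ∃ m ∈ pvMarkers, m <+: lo.drop j

lemma pvHit_bool (s : List Char) :
    (pvMarkers.any (fun m => m.isPrefixOf s)) = true ↔ ∃ m ∈ pvMarkers, m <+: s := by
  simp [List.any_eq_true, List.isPrefixOf_iff_prefix]

lemma pvHit_nil (j : Nat) : ¬ pvHit [] j := by
  intro ⟨m, hm, hp⟩
  have : (pvMarkers.any (fun m => m.isPrefixOf ([] : List Char))) = true :=
    (pvHit_bool []).2 ⟨m, hm, by simpa using hp⟩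
  exact absurd this (by decide)

lemma pvHit_cons (c : Char) (rest : List Char) (j : Nat) :
    pvHit (c :: rest) (j + 1) ↔ pvHit rest j := by
  simp [pvHit]

lemma pvScan_shift (lo : List Char) (i : Nat) :
    pvScan lo i = (pvScan lo 0).map (· + i) := by
  induction lo generalizing i with
  | nil => simp [pvScan]
  | cons c rest ih =>
    by_cases h : (pvMarkers.any (fun m => m.isPrefixOf (c :: rest))) = true
    · simp [pvScan, h]
    · simp only [pvScan, h, if_neg, Bool.not_eq_true] at *
      rw [ih (i + 1), ih 1, Option.map_map]
      congr 1; funext x; simp; omega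

lemma pvScan_none_iff (lo : List Char) :
    pvScan lo 0 = none ↔ ∀ j, ¬ pvHit lo j := by
  induction lo with
  | nil =>
    simp only [pvScan, true_iff]
    exact fun j => pvHit_nil j
  | cons c rest ih =>
    by_cases h : (pvMarkers.any (fun m => m.isPrefixOf (c :: rest))) = true
    · rw [pvScan, if_pos h]
      constructor
      · intro hc; cases hc
      · intro hall
        exact absurd ((pvHit_bool _).1 h) (by simpa [pvHit] using hall 0)
    · rw [pvScan, if_neg h, pvScan_shift rest 1]
      rw [Option.map_eq_none_iff, ih]
      constructor
      · intro hall j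
        match j with
        | 0 => intro hh; exact absurd ((pvHit_bool _).2 (by simpa [pvHit] using hh)) h
        | j + 1 => rw [pvHit_cons]; exact hall j
      · intro hall j; rw [← pvHit_cons c rest j]; exact hall (j + 1)

lemma pvScan_some_iff (lo : List Char) (k : Nat) :
    pvScan lo 0 = some k ↔ pvHit lo k ∧ ∀ j < k, ¬ pvHit lo j := by
  induction lo generalizing k with
  | nil =>
    rw [pvScan]
    constructor
    · intro hc; cases hc
    · intro ⟨hh, _⟩; exact absurd hh (pvHit_nil k)
  | cons c rest ih =>
    by_cases h : (pvMarkers.any (fun m => m.isPrefixOf (c :: rest))) = true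
    · rw [pvScan, if_pos h, Option.some.injEq]
      constructor
      · rintro rfl
        refine ⟨by simpa [pvHit] using (pvHit_bool _).1 h, by omega⟩
      · rintro ⟨_, hleast⟩
        by_contra hk
        have : 0 < k := Nat.pos_of_ne_zero (fun h0 => hk h0.symm)
        exact hleast 0 this (by simpa [pvHit] using (pvHit_bool _).1 h)
    · have h0 : ¬ pvHit (c :: rest) 0 :=
        fun hh => h ((pvHit_bool _).2 (by simpa [pvHit] using hh))
      rw [pvScan, if_neg h, pvScan_shift rest 1, Option.map_eq_some_iff]
      constructor
      · rintro ⟨a, ha, rfl⟩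
        obtain ⟨hh, hleast⟩ := (ih a).1 ha
        refine ⟨(pvHit_cons c rest a).2 hh, ?_⟩
        intro j hj
        match j with
        | 0 => exact h0
        | j + 1 => rw [pvHit_cons]; exact hleast j (by omega)
      · rintro ⟨hh, hleast⟩
        match k with
        | 0 => exact absurd hh h0
        | k + 1 =>
          refine ⟨k, (ih k).2 ⟨(pvHit_cons c rest k).1 hh, ?_⟩, rfl⟩
          intro j hj
          rw [← pvHit_cons c rest j]
          exact hleast (j + 1) (by omega)

-- A-side: the fold computes the first index where the processed predicate holds
def pvIsFirst (p : Nat → Prop) : Option Int → Prop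
  | none => ∀ j, ¬ p j
  | some v => 0 ≤ v ∧ p v.toNat ∧ ∀ j < v.toNat, ¬ p j

lemma pvIsFirst_congr {p q : Nat → Prop} {o : Option Int} (h : ∀ j, p j ↔ q j) :
    pvIsFirst p o → pvIsFirst q o := by
  cases o with
  | none => intro hp j; exact fun hq => hp j ((h j).2 hq)
  | some v =>
    rintro ⟨h0, hp, hleast⟩
    exact ⟨h0, (h _).1 hp, fun j hj hq => hleast j hj ((h j).2 hq)⟩

lemma pvStepA_isFirst (lo : List Char) (p : Nat → Prop) (acc : Option Int) (m : List Char)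
    (h : pvIsFirst p acc) :
    pvIsFirst (fun j => p j ∨ m <+: lo.drop j) (pvStepA lo acc m) := by
  unfold pvStepA
  by_cases hidx : PySem.Chars.find lo m = -1
  · simp only [hidx, if_true]
    have hnone : ∀ j, ¬ m <+: lo.drop j := by
      intro j hj
      have hin : PySem.Chars.isIn m lo = true :=
        (PySem.Chars.exists_prefix_drop_iff_isIn m lo).1 ⟨j, hj⟩
      have : m <:+: lo := (PySem.Chars.isIn_iff_infix _ _).1 hin
      exact (PySem.Chars.find_eq_neg_one_iff _ _).1 hidx this
    refine pvIsFirst_congr (fun j => ?_) h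
    constructor
    · exact Or.inl
    · rintro (hp | hq)
      · exact hp
      · exact absurd hq (hnone j)
  · have hge : 0 ≤ PySem.Chars.find lo m := by
      have := PySem.Chars.neg_one_le_find lo m
      omega
    obtain ⟨hq, hqleast⟩ := PySem.Chars.find_spec (s := lo) (sub := m) hge
    simp only [hidx, if_false]
    cases acc with
    | none =>
      refine ⟨hge, Or.inr hq, ?_⟩
      intro j hj
      rintro (hp | hq')
      · exact h j hp
      · exact hqleast j hj hq'
    | some f =>
      obtain ⟨hf0, hpf, hpleast⟩ := h
      by_cases hlt : PySem.Chars.find lo m < f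
      · simp only [hlt, if_true]
        refine ⟨hge, Or.inr hq, ?_⟩
        intro j hj
        rintro (hp | hq')
        · exact hpleast j (by omega) hp
        · exact hqleast j hj hq'
      · simp only [hlt, if_false]
        refine ⟨hf0, Or.inl hpf, ?_⟩
        intro j hj
        rintro (hp | hq')
        · exact hpleast j hj hp
        · exact hqleast j (by omega) hq'

lemma pvFold_isFirst (lo : List Char) (ms : List (List Char)) :
    ∀ (acc : Option Int) (p : Nat → Prop), pvIsFirst p acc →
      pvIsFirst (fun j => p j ∨ ∃ m ∈ ms, m <+: lo.drop j) (ms.foldl (pvStepA lo) acc) := by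
  induction ms with
  | nil =>
    intro acc p h
    simpa using pvIsFirst_congr (fun j => by simp) h
  | cons m ms ih =>
    intro acc p h
    have hstep := pvStepA_isFirst lo p acc m h
    have := ih (pvStepA lo acc m) _ hstep
    refine pvIsFirst_congr (fun j => ?_) this
    simp; tauto

lemma pvAfold_isFirst (lo : List Char) :
    pvIsFirst (pvHit lo) (pvMarkers.foldl (pvStepA lo) none) := by
  have h0 : pvIsFirst (fun _ => False) (none : Option Int) := fun j h => h
  have := pvFold_isFirst lo pvMarkers none _ h0
  exact pvIsFirst_congr (fun j => by simp [pvHit]) this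

-- ===== VERDICT (by name: the statement is the Claim_ definition above) =====
theorem strip_inline_system_meta_py_spec : Claim_equal_strip_inline_system_meta_py := by
  intro line _
  unfold Spec_strip_inline_system_meta_py strip_inline_system_meta_py strip_inline_system_meta_py_alt
  show (match pvMarkers.foldl (pvStepA ((PySem.Str.lower line).toList)) none with
        | none => PySem.Str.strip line
        | some fi =>
          if fi = 0 then ""
          else String.ofList (pvRstrip (PySem.Chars.slice line.toList none (some fi)) pvStripSet)) =
       (match pvScan ((PySem.Str.lower line).toList) 0 with
        | none => PySem.Str.strip line
        | some i =>
          if i = 0 then "" else String.ofList (pvRstrip (line.toList.take i) pvStripSet))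
  generalize (PySem.Str.lower line).toList = lo
  have hA := pvAfold_isFirst lo
  cases hscan : pvScan lo 0 with
  | none =>
    have hnone : ∀ j, ¬ pvHit lo j := (pvScan_none_iff lo).1 hscan
    cases hAv : pvMarkers.foldl (pvStepA lo) none with
    | none => rfl
    | some v =>
      rw [hAv] at hA
      exact absurd hA.2.1 (hnone _)
  | some k =>
    obtain ⟨hhit, hleast⟩ := (pvScan_some_iff lo k).1 hscan
    cases hAv : pvMarkers.foldl (pvStepA lo) none with
    | none =>
      rw [hAv] at hA
      exact absurd hhit (hA k)
    | some v =>
      rw [hAv] at hA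
      obtain ⟨hv0, hvhit, hvleast⟩ := hA
      have hkv : v.toNat = k := by
        rcases Nat.lt_trichotomy v.toNat k with h | h | h
        · exact absurd hvhit (hleast _ h)
        · exact h
        · exact absurd hhit (hvleast _ h)
      by_cases hk0 : k = 0
      · have hv0' : v = 0 := by omega
        simp [hv0', hk0]
      · have hvne : ¬ v = 0 := by omega
        simp only [if_neg hvne, if_neg hk0]
        congr 1
        rw [PySem.Chars.slice_eq_listSlice, PySem.List.slice_to (hb := hv0), hkv]
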